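-- pv_equiv track=rewrite | github.com/odb9402/AppliedGraphTheory_mid | graph_opt.py | remove_duplicate_in_cycle
-- ===== SOURCE A (Python) =====
-- def remove_duplicate_in_cycle(C):
--     before = C[0]
--     cycle = [C[0]]
--     for c_i in C:
--         if c_i == before:
--             continue
--         else:
--             before = c_i
--             cycle.append(c_i)
--     return cycle
-- ===== SOURCE B (Python) =====
-- def remove_duplicate_in_cycle(C):
--     def dd(seg):
--         if len(seg) <= 1:
--             return seg
--         mid = len(seg) // 2
--         L = dd(seg[:mid])
--         R = dd(seg[mid:])
--         if L and R and R[0] == L[-1]: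
--             return L + R[1:]
--         return L + R
--     return dd(C)
-- ===== Notes on version B (the rewrite author's own statement) =====
-- stated objective: alternative
-- what changed: Replaces the linear before-accumulator loop with a divide-and-conquer pass: split the list in half, dedup each half recursively, and concatenate the halves dropping the right half's head when it equals the left half's last element; B returns [] on the empty list where A raises.
-- outside the precondition, e.g. on remove_duplicate_in_cycle([]): A raises IndexError, B returns []
import Mathlib
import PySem

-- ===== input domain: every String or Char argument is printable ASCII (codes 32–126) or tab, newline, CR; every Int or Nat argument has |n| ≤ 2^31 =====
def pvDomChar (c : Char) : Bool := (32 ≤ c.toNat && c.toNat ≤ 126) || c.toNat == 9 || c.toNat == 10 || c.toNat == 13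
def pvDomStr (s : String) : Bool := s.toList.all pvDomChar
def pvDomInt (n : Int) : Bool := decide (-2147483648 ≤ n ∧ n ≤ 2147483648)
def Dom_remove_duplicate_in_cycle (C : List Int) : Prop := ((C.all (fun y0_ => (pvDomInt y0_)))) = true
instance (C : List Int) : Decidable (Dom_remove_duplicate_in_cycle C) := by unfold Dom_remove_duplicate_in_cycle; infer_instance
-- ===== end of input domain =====

-- B replaces the linear before-accumulator loop with a divide-and-conquer dedup:
-- split in half, recurse, and join dropping the boundary duplicate (objective:
-- alternative). On the empty list A raises IndexError; B returns [] (outside Pre_).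

-- ===== PORT A =====
def remove_duplicate_in_cycle (C : List Int) : List Int :=
  match PySem.List.pyGet? C 0 with
  | none => []   -- Python raises IndexError on C[0]; excluded by Pre_
  | some b0 =>
      (C.foldl (fun (s : Int × List Int) c_i =>
        if c_i = s.1 then s else (c_i, s.2 ++ [c_i])) (b0, [b0])).2

-- ===== PORT B =====
-- dd: seg[:mid] / seg[mid:] with 0 ≤ mid ≤ len are exactly List.take / List.drop
def pvDD (seg : List Int) : List Int :=
  if seg.length ≤ 1 then seg
  else
    let mid := seg.length / 2
    let L := pvDD (seg.take mid)
    let R := pvDD (seg.drop mid)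
    match L.getLast?, R with
    | some a, r :: rs => if r = a then L ++ rs else L ++ R
    | _, _ => L ++ R
termination_by seg.length
decreasing_by
  · simp; omega
  · simp; omega

def remove_duplicate_in_cycle_alt (C : List Int) : List Int := pvDD C

-- ===== PRECONDITION & SPEC =====
-- Pre_ excludes the empty list, on which Python's A raises IndexError at C[0].
def Pre_remove_duplicate_in_cycle (C : List Int) : Prop := C ≠ []
instance (C : List Int) : Decidable (Pre_remove_duplicate_in_cycle C) := by unfold Pre_remove_duplicate_in_cycle; infer_instance
def pvWitness_remove_duplicate_in_cycle : List Int := [1, 1, 2, 2, 3, 1]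

def Spec_remove_duplicate_in_cycle (C : List Int) (out : List Int) : Prop := out = remove_duplicate_in_cycle_alt C
instance (C : List Int) (out : List Int) : Decidable (Spec_remove_duplicate_in_cycle C out) := by unfold Spec_remove_duplicate_in_cycle; infer_instance

-- ===== CLAIM (what is proved, stated in full; the proofs are below) =====
def Claim_equal_remove_duplicate_in_cycle : Prop := ∀ (C : List Int), Dom_remove_duplicate_in_cycle C → Pre_remove_duplicate_in_cycle C → Spec_remove_duplicate_in_cycle C (remove_duplicate_in_cycle C)

-- ===== LEMMAS AND PROOFS =====

-- reference function: drop elements equal to the running predecessor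
def pvPD (t : List Int) (x : Int) : List Int :=
  match t with
  | [] => []
  | c :: t' => if c = x then pvPD t' x else c :: pvPD t' c

def pvND : List Int → List Int
  | [] => []
  | h :: t => h :: pvPD t h

def pvLastD (x : Int) (t : List Int) : Int :=
  match t with
  | [] => x
  | a :: t' => pvLastD a t'

theorem pvGetLast?_cons (a : Int) (l : List Int) : (a :: l).getLast? = some (pvLastD a l) := by
  induction l generalizing a with
  | nil => rfl
  | cons b l ih => simp [pvLastD, ← ih b]

theorem pvLastD_pd (t : List Int) (x : Int) : pvLastD x (pvPD t x) = pvLastD x t := by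
  induction t generalizing x with
  | nil => rfl
  | cons c t ih =>
      by_cases h : c = x
      · subst h; simp [pvPD, pvLastD, ih]
      · simp [pvPD, h, pvLastD, ih]

theorem pvPD_append (t ys : List Int) (x : Int) :
    pvPD (t ++ ys) x = pvPD t x ++ pvPD ys (pvLastD x t) := by
  induction t generalizing x with
  | nil => simp [pvPD, pvLastD]
  | cons c t ih =>
      by_cases h : c = x
      · subst h; simp [pvPD, pvLastD, ih]
      · simp [pvPD, h, pvLastD, ih]

-- joining two deduped halves = dedup of the concatenation
theorem pvND_append (l1 l2 : List Int) :
    pvND (l1 ++ l2) =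
      (match (pvND l1).getLast?, pvND l2 with
       | some a, r :: rs => if r = a then pvND l1 ++ rs else pvND l1 ++ (r :: rs)
       | _, _ => pvND l1 ++ pvND l2) := by
  cases l1 with
  | nil => cases l2 <;> simp [pvND]
  | cons h t1 =>
      cases l2 with
      | nil => simp [pvND, pvGetLast?_cons, pvPD]
      | cons d t2 =>
          simp only [pvND, List.cons_append, pvPD_append, pvGetLast?_cons, pvLastD_pd]
          by_cases hd : d = pvLastD h t1
          · simp [pvPD, hd]
          · simp [pvPD, hd]

theorem pvDD_eq_nd (seg : List Int) : pvDD seg = pvND seg := by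
  fun_induction pvDD seg with
  | case1 seg h =>
      match seg, h with
      | [], _ => rfl
      | [a], _ => rfl
  | case2 seg h mid L R r rs hR hL ihT ihD =>
      have hT : L = pvND (List.take mid seg) := ihT
      have hD : R = pvND (List.drop mid seg) := ihD
      conv_rhs => rw [← List.take_append_drop mid seg]
      rw [pvND_append, ← hT, ← hD, hR, hL]
      simp
  | case3 seg h mid L R a r rs hR hL hne ihT ihD =>
      have hT : L = pvND (List.take mid seg) := ihT
      have hD : R = pvND (List.drop mid seg) := ihD
      conv_rhs => rw [← List.take_append_drop mid seg]
      rw [pvND_append, ← hT, ← hD, hR, hL]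
      simp [hne]
  | case4 seg h mid L R hnone ihT ihD =>
      have hT : L = pvND (List.take mid seg) := ihT
      have hD : R = pvND (List.drop mid seg) := ihD
      conv_rhs => rw [← List.take_append_drop mid seg]
      rw [pvND_append, ← hT, ← hD]
      rcases hL' : L.getLast? with _ | a
      · rcases hD' : R with _ | ⟨r, rs⟩ <;> simp
      · rcases hD' : R with _ | ⟨r, rs⟩
        · simp
        · exact (hnone a r rs hL' hD').elim

theorem pvLoop_eq_pd (l : List Int) (x : Int) (acc : List Int) :
    (l.foldl (fun (s : Int × List Int) c =>
        if c = s.1 then s else (c, s.2 ++ [c])) (x, acc)).2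
      = acc ++ pvPD l x := by
  induction l generalizing x acc with
  | nil => simp [pvPD]
  | cons c l ih =>
      by_cases h : c = x
      · subst h; simp [pvPD, ih]
      · simp [pvPD, h, ih c (acc ++ [c])]

-- ===== VERDICT (by name: the statement is the Claim_ definition above) =====
theorem remove_duplicate_in_cycle_spec : Claim_equal_remove_duplicate_in_cycle := by
  intro C _ hC
  unfold Spec_remove_duplicate_in_cycle remove_duplicate_in_cycle remove_duplicate_in_cycle_alt
  rw [pvDD_eq_nd]
  cases C with
  | nil => exact absurd rfl hC
  | cons h t =>
      simp [PySem.List.pyGet?, PySem.List.pyIdx?, pvLoop_eq_pd t h [h], pvND, pvPD]
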